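-- pv_equiv track=rewrite | github.com/nachiket1386/AMS | core/services/conflict_resolver.py | _records_differ
-- ===== SOURCE A (Python) =====
-- def _records_differ(record1, record2):
--     """
--     Compare two records excluding timestamps and checksums
--
--     Args:
--         record1: First record dict
--         record2: Second record dict
--
--     Returns:
--         bool: True if records differ, False if identical
--     """
--     # Fields to exclude from comparison
--     exclude_fields = {'checksum', 'created_at', 'updated_at', 'id'}
--
--     # Get all keys from both records
--     all_keys = set(record1.keys()) | set(record2.keys())
--
--     # Compare each field
--     for key in all_keys:
--         if key in exclude_fields:
--             continue
--
--         val1 = record1.get(key)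
--         val2 = record2.get(key)
--
--         # Normalize None and empty string
--         if val1 in (None, ''):
--             val1 = None
--         if val2 in (None, ''):
--             val2 = None
--
--         if val1 != val2:
--             return True
--
--     return False
-- ===== SOURCE B (Python) =====
-- def _records_differ(record1, record2):
--     exclude_fields = {'checksum', 'created_at', 'updated_at', 'id'}
--
--     def significant(rec):
--         # normalized view: drop excluded fields and collapse None/'' to absence
--         return {k: v for k, v in rec.items()
--                 if k not in exclude_fields and v not in (None, '')}
--
--     return significant(record1) != significant(record2)
-- ===== Notes on version B (the rewrite author's own statement) =====
-- stated objective: simpler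
-- what changed: Replaces the key-union loop with per-key get/normalize/early-return by building a normalized filtered dict for each record (empty/None values dropped, excluded fields removed) and comparing the two dicts with a single != .
import Mathlib
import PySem

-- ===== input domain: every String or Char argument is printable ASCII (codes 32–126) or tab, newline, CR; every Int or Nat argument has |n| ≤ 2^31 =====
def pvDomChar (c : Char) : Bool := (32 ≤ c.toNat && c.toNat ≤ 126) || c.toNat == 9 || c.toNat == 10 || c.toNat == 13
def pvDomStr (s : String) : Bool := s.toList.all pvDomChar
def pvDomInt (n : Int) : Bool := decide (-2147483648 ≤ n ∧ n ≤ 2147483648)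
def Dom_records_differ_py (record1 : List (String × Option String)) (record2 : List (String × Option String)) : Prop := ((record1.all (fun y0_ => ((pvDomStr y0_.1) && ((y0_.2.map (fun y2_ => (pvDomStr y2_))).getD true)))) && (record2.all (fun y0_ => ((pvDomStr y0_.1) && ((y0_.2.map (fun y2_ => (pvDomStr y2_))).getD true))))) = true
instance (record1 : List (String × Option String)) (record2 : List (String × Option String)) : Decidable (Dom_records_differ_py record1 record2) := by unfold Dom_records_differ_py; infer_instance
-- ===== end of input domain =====

-- B replaces A's key-union loop (get each key, normalize, early-return on first difference) by
-- building one normalized filtered dict per record and comparing the two dicts with a single != .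

-- exclude_fields = {'checksum', 'created_at', 'updated_at', 'id'}
def pvExclude : PySem.Set String :=
  PySem.Set.ofList ["checksum", "created_at", "updated_at", "id"]

-- ===== PORT A =====
-- "if val in (None, ''): val = None"
def pvNormA (v : Option String) : Option String :=
  if v == none || v == some "" then none else v

def records_differ_py (record1 : List (String × Option String)) (record2 : List (String × Option String)) : Bool :=
  let d1 := PySem.Dict.ofList record1
  let d2 := PySem.Dict.ofList record2
  -- all_keys = set(record1.keys()) | set(record2.keys())
  let allKeys : PySem.Set String :=
    PySem.Set.union (PySem.Set.ofList (PySem.Dict.keys d1)) (PySem.Dict.keys d2)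
  -- for key in all_keys: … return True on first difference; return False  (order-independent result)
  allKeys.any (fun key =>
    if pvExclude.contains key then false
    else
      let val1 := pvNormA (PySem.Dict.getD d1 key none)
      let val2 := pvNormA (PySem.Dict.getD d2 key none)
      val1 != val2)

-- ===== PORT B =====
-- "k not in exclude_fields and v not in (None, '')"
def pvKeep (p : String × Option String) : Bool :=
  !(pvExclude.contains p.1) && p.2 != none && p.2 != some ""

-- significant(rec): the filtering dict comprehension over rec.items()
def pvCore (rec : List (String × Option String)) : PySem.Dict String (Option String) :=
  (PySem.Dict.ofList rec).items.foldl
    (fun d p => if pvKeep p then d.insert p.1 p.2 else d) PySem.Dict.empty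

-- Python dict == is order-insensitive: same key set and same value at every key
def pvDictEq (d1 d2 : PySem.Dict String (Option String)) : Bool :=
  PySem.Set.equal (PySem.Set.ofList (PySem.Dict.keys d1)) (PySem.Set.ofList (PySem.Dict.keys d2))
  && (PySem.Dict.keys d1).all (fun k => PySem.Dict.get? d1 k == PySem.Dict.get? d2 k)

def records_differ_py_alt (record1 : List (String × Option String)) (record2 : List (String × Option String)) : Bool :=
  !(pvDictEq (pvCore record1) (pvCore record2))

-- ===== PRECONDITION & SPEC =====
def Spec_records_differ_py (record1 : List (String × Option String)) (record2 : List (String × Option String)) (out : Bool) : Prop := out = records_differ_py_alt record1 record2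
instance (record1 : List (String × Option String)) (record2 : List (String × Option String)) (out : Bool) : Decidable (Spec_records_differ_py record1 record2 out) := by unfold Spec_records_differ_py; infer_instance

-- ===== CLAIM (what is proved, stated in full; the proofs are below) =====
def Claim_equal_records_differ_py : Prop := ∀ (record1 : List (String × Option String)) (record2 : List (String × Option String)), Dom_records_differ_py record1 record2 → Spec_records_differ_py record1 record2 (records_differ_py record1 record2)

-- ===== LEMMAS AND PROOFS =====

-- the fold step of pvCore
def pvStep (d : PySem.Dict String (Option String)) (p : String × Option String) : PySem.Dict String (Option String) :=
  if pvKeep p then d.insert p.1 p.2 else d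

theorem pvCore_eq_foldl (rec : List (String × Option String)) :
    pvCore rec = (PySem.Dict.ofList rec).items.foldl pvStep PySem.Dict.empty := rfl

-- a fold over pairs whose keys avoid k leaves get? k unchanged
theorem pvFold_get?_untouched (l : List (String × Option String))
    (acc : PySem.Dict String (Option String)) (k : String)
    (h : k ∉ l.map Prod.fst) :
    (l.foldl pvStep acc).get? k = acc.get? k := by
  induction l generalizing acc with
  | nil => rfl
  | cons p t ih =>
    simp only [List.map_cons, List.mem_cons, not_or] at h
    simp only [List.foldl_cons]
    rw [ih _ h.2]
    unfold pvStep
    split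
    · exact PySem.Dict.get?_insert_of_ne _ _ h.1
    · rfl

theorem pvFold_get? (l : List (String × Option String))
    (acc : PySem.Dict String (Option String)) (k : String)
    (hnd : (l.map Prod.fst).Nodup) :
    (l.foldl pvStep acc).get? k =
      match l.find? (fun p => p.1 == k) with
      | some p => if pvKeep p then some p.2 else acc.get? k
      | none => acc.get? k := by
  induction l generalizing acc with
  | nil => rfl
  | cons p t ih =>
    simp only [List.map_cons, List.nodup_cons] at hnd
    simp only [List.foldl_cons]
    by_cases hk : p.1 = k
    · subst hk
      rw [List.find?_cons_of_pos (by simp)]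
      rw [pvFold_get?_untouched t _ p.1 hnd.1]
      unfold pvStep
      split <;> rename_i hkeep <;> simp [hkeep, PySem.Dict.get?_insert_self]
    · have hstep : (pvStep acc p).get? k = acc.get? k := by
        unfold pvStep
        split
        · exact PySem.Dict.get?_insert_of_ne _ _ (Ne.symm hk)
        · rfl
      rw [ih _ hnd.2, hstep, List.find?_cons_of_neg (by simp [hk])]

-- Dict.get? as find? on the items list
theorem pvDict_get?_eq_find? (l : List (String × Option String)) (k : String) :
    (PySem.Dict.mk l).get? k = (l.find? (fun p => p.1 == k)).map Prod.snd := by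
  induction l with
  | nil => rfl
  | cons p t ih =>
    obtain ⟨a, v⟩ := p
    rw [List.find?_cons]
    by_cases h : a = k
    · subst h; simp [PySem.Dict.get?_mk_cons]
    · have hb : (a == k) = false := by simp [h]
      simp [PySem.Dict.get?_mk_cons, hb, ih]

-- characterization of the normalized filtered dict
theorem pvCore_get? (rec : List (String × Option String)) (k : String) :
    (pvCore rec).get? k =
      if pvExclude.contains k then none
      else (pvNormA (PySem.Dict.getD (PySem.Dict.ofList rec) k none)).map some := by
  have hnd : ((PySem.Dict.ofList rec).items.map Prod.fst).Nodup := by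
    simpa [PySem.Dict.keys] using PySem.Dict.nodup_keys_ofList rec
  rw [pvCore_eq_foldl, pvFold_get? _ _ _ hnd]
  have hget : (PySem.Dict.ofList rec).get? k =
      ((PySem.Dict.ofList rec).items.find? (fun p => p.1 == k)).map Prod.snd :=
    pvDict_get?_eq_find? _ k
  rw [PySem.Dict.getD_eq_get?_getD, hget]
  cases hfind : (PySem.Dict.ofList rec).items.find? (fun p => p.1 == k) with
  | none => simp [pvNormA, PySem.Dict.get?_empty]
  | some q =>
    obtain ⟨a, v⟩ := q
    have hq : a = k := by simpa using List.find?_some hfind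
    subst hq
    rcases v with _ | s
    · by_cases he : pvExclude.contains a <;>
        simp [pvKeep, pvNormA, he, PySem.Dict.get?_empty]
    · by_cases he : pvExclude.contains a <;> by_cases hs : s = "" <;>
        simp [pvKeep, pvNormA, he, hs, PySem.Dict.get?_empty]

-- pvDictEq is pointwise get? equality
theorem pvDictEq_iff (d1 d2 : PySem.Dict String (Option String)) :
    pvDictEq d1 d2 = true ↔ ∀ k, d1.get? k = d2.get? k := by
  unfold pvDictEq
  rw [Bool.and_eq_true, PySem.Set.equal_iff, List.all_eq_true]
  constructor
  · rintro ⟨hkeys, hvals⟩ k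
    by_cases hk : k ∈ d1.keys
    · simpa using hvals k hk
    · have hk2 : k ∉ d2.keys := by
        intro h2
        exact hk (by
          have := (hkeys k).mpr (by simpa [PySem.Set.mem_ofList] using h2)
          simpa [PySem.Set.mem_ofList] using this)
      rw [(PySem.Dict.get?_eq_none_iff_not_mem_keys _ _).mpr hk,
          (PySem.Dict.get?_eq_none_iff_not_mem_keys _ _).mpr hk2]
  · intro h
    refine ⟨fun k => ?_, fun k _ => by simp [h k]⟩
    simp only [PySem.Set.mem_ofList]
    constructor <;> intro hm
    · by_contra h2
      have := (PySem.Dict.get?_eq_none_iff_not_mem_keys _ _).mpr h2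
      rw [← h k] at this
      exact (PySem.Dict.get?_eq_none_iff_not_mem_keys _ _).mp this hm
    · by_contra h1
      have := (PySem.Dict.get?_eq_none_iff_not_mem_keys _ _).mpr h1
      rw [h k] at this
      exact (PySem.Dict.get?_eq_none_iff_not_mem_keys _ _).mp this hm

-- A = true iff some non-excluded key has differing normalized values
theorem pvA_iff (record1 record2 : List (String × Option String)) :
    records_differ_py record1 record2 = true ↔
      ∃ k, pvExclude.contains k = false ∧
        pvNormA (PySem.Dict.getD (PySem.Dict.ofList record1) k none) ≠
        pvNormA (PySem.Dict.getD (PySem.Dict.ofList record2) k none) := by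
  unfold records_differ_py
  rw [List.any_eq_true]
  constructor
  · rintro ⟨k, _, hp⟩
    cases he : pvExclude.contains k with
    | true => rw [he] at hp; simp at hp
    | false =>
      rw [he] at hp
      refine ⟨k, he, ?_⟩
      simpa [bne_iff_ne] using hp
  · rintro ⟨k, he, hne⟩
    refine ⟨k, ?_, by rw [he]; simpa [bne_iff_ne] using hne⟩
    by_contra hnot
    rw [PySem.Set.mem_union, PySem.Set.mem_ofList] at hnot
    push_neg at hnot
    have h1 : (PySem.Dict.ofList record1).get? k = none :=
      (PySem.Dict.get?_eq_none_iff_not_mem_keys _ _).mpr hnot.1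
    have h2 : (PySem.Dict.ofList record2).get? k = none :=
      (PySem.Dict.get?_eq_none_iff_not_mem_keys _ _).mpr hnot.2
    rw [PySem.Dict.getD_eq_get?_getD, h1, PySem.Dict.getD_eq_get?_getD, h2] at hne
    exact hne rfl

-- pointwise equality of the two normalized dicts = agreement of A's normalized values
theorem pvCore_pointwise (record1 record2 : List (String × Option String)) :
    (∀ k, (pvCore record1).get? k = (pvCore record2).get? k) ↔
      ∀ k, pvExclude.contains k = false →
        pvNormA (PySem.Dict.getD (PySem.Dict.ofList record1) k none) =
        pvNormA (PySem.Dict.getD (PySem.Dict.ofList record2) k none) := by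
  constructor
  · intro h k hek
    have := h k
    rw [pvCore_get?, pvCore_get?, hek] at this
    simp only [Bool.false_eq_true, if_false] at this
    exact Option.map_injective (Option.some_injective _) this
  · intro h k
    rw [pvCore_get?, pvCore_get?]
    by_cases he : pvExclude.contains k
    · simp [show k ∈ pvExclude by simpa using he]
    · simp only [he, Bool.false_eq_true, if_false]
      rw [h k (by simpa using he)]

-- ===== VERDICT (by name: the statement is the Claim_ definition above) =====
theorem records_differ_py_spec : Claim_equal_records_differ_py := by
  intro record1 record2 _
  unfold Spec_records_differ_py records_differ_py_alt
  cases hd : pvDictEq (pvCore record1) (pvCore record2) with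
  | true =>
    have hpt := (pvDictEq_iff _ _).mp hd
    have hA : records_differ_py record1 record2 = false := by
      rw [← Bool.not_eq_true, pvA_iff]
      push_neg
      intro k he
      by_contra hne
      exact hne ((pvCore_pointwise record1 record2).mp hpt k he)
    simp [hA]
  | false =>
    have hnpt : ¬ ∀ k, (pvCore record1).get? k = (pvCore record2).get? k := by
      intro h
      rw [(pvDictEq_iff _ _).mpr h] at hd
      exact Bool.true_eq_false.mp hd
    have hA : records_differ_py record1 record2 = true := by
      rw [pvA_iff]
      by_contra hno
      push_neg at hno
      apply hnpt
      rw [pvCore_pointwise]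
      intro k he
      exact hno k he
    simp [hA]
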